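-- pv_equiv track=rewrite | github.com/nishikantmandal007/HIPE_PII_benchmarking | data_preprocessing.py | chunk_by_sentence
-- ===== SOURCE A (Python) =====
-- def chunk_by_sentence(sentences, max_tokens=384):
--     chunks = []
--     current_chunk = []
--     current_len = 0
--     for sent in sentences:
--         sent_len = len(sent)
--         if current_len + sent_len > max_tokens and current_chunk:
--             chunks.append(current_chunk)
--             current_chunk = []
--             current_len = 0
--         current_chunk.extend(sent)
--         current_len += sent_len
--     if current_chunk:
--         chunks.append(current_chunk)
--     return chunks
-- ===== SOURCE B (Python) =====
-- def chunk_by_sentence(sentences, max_tokens=384):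
--     # Two-pointer cut-point scan: for each chunk start i, advance j to the
--     # first cut index, then emit the slice sentences[i:j] flattened. No token
--     # buffer or flush state is maintained across sentences.
--     chunks = []
--     n = len(sentences)
--     i = 0
--     while i < n:
--         j = i + 1
--         size = len(sentences[i])
--         while j < n and not (size and size + len(sentences[j]) > max_tokens):
--             size += len(sentences[j])
--             j += 1
--         head = [tok for sent in sentences[i:j] for tok in sent]
--         if head:
--             chunks.append(head)
--         i = j
--     return chunks
-- ===== Notes on version B (the rewrite author's own statement) =====
-- stated objective: alternative
-- what changed: B replaces A's accumulator-with-flush pass (a flat token buffer extended sentence by sentence and flushed when full) by a two-pointer scan over indices: for each chunk start i it advances j to the first cut index using only a running size counter, then emits the slice sentences[i:j] flattened in one comprehension; no chunk buffer or cross-sentence flush state exists.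
import Mathlib
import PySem

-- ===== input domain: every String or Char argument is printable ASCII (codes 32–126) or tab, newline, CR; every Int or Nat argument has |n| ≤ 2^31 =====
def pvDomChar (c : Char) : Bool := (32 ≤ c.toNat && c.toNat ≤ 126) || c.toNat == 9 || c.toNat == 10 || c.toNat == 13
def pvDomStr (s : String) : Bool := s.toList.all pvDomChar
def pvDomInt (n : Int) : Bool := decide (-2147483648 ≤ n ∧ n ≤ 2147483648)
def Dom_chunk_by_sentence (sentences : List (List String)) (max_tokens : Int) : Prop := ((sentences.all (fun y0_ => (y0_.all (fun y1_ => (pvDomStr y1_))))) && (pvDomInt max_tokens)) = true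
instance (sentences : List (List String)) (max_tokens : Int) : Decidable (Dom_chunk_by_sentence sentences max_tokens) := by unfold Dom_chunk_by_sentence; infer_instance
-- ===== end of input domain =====

-- B replaces A's flush-buffer accumulator pass by a two-pointer cut-point scan with slice flattening; alternative decomposition, same cost.


-- ===== PORT A =====
-- A's single loop: flat token buffer `cur` extended in place, flushed when full.
def pvA_loop (max_tokens : Int) : List (List String) → List (List String) → List String → Int → List (List String)
  | [], chunks, cur, _ => if cur ≠ [] then chunks ++ [cur] else chunks
  | sent :: rest, chunks, cur, len =>
    if len + (sent.length : Int) > max_tokens ∧ cur ≠ [] then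
      pvA_loop max_tokens rest (chunks ++ [cur]) ([] ++ sent) (0 + (sent.length : Int))
    else
      pvA_loop max_tokens rest chunks (cur ++ sent) (len + (sent.length : Int))

def chunk_by_sentence (sentences : List (List String)) (max_tokens : Int) : List (List String) :=
  pvA_loop max_tokens sentences [] [] 0

-- ===== PORT B =====
-- B inner while: advance j past sentences that still fit (or while size is 0); indexing is in range (j < n).
def pvB_inner (m : Int) (xs : List (List String)) (n : Nat) (j : Nat) (size : Int) : Nat :=
  if _h : j < n ∧ ¬ (size ≠ 0 ∧ size + ((xs.getD j []).length : Int) > m) then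
    pvB_inner m xs n (j + 1) (size + ((xs.getD j []).length : Int))
  else j
  termination_by n - j
  decreasing_by omega

-- the inner loop only moves j forward (cited by the outer loop's termination proof)
theorem pvB_inner_ge (m : Int) (xs : List (List String)) (n : Nat) :
    ∀ j size, j ≤ pvB_inner m xs n j size := by
  intro j size
  induction j, size using pvB_inner.induct m xs n with
  | case1 j size h ih => rw [pvB_inner, dif_pos h]; omega
  | case2 j size h => rw [pvB_inner, dif_neg h]

-- B outer while: emit the flattened slice xs[i:j] (exact: 0 ≤ i ≤ j) and jump i to j.
def pvB_outer (m : Int) (xs : List (List String)) (n : Nat) (i : Nat) (chunks : List (List String)) : List (List String) :=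
  if _h : i < n then
    let j := pvB_inner m xs n (i + 1) ((xs.getD i []).length : Int)
    let head := ((xs.take j).drop i).flatten
    pvB_outer m xs n j (if head ≠ [] then chunks ++ [head] else chunks)
  else chunks
  termination_by n - i
  decreasing_by
    have := pvB_inner_ge m xs n (i + 1) ((xs.getD i []).length : Int)
    omega

def chunk_by_sentence_alt (sentences : List (List String)) (max_tokens : Int) : List (List String) :=
  pvB_outer max_tokens sentences sentences.length 0 []

-- ===== PRECONDITION & SPEC =====
def Spec_chunk_by_sentence (sentences : List (List String)) (max_tokens : Int) (out : List (List String)) : Prop := out = chunk_by_sentence_alt sentences max_tokens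
instance (sentences : List (List String)) (max_tokens : Int) (out : List (List String)) : Decidable (Spec_chunk_by_sentence sentences max_tokens out) := by unfold Spec_chunk_by_sentence; infer_instance

-- ===== CLAIM (what is proved, stated in full; the proofs are below) =====
def Claim_equal_chunk_by_sentence : Prop := ∀ (sentences : List (List String)) (max_tokens : Int), Dom_chunk_by_sentence sentences max_tokens → Spec_chunk_by_sentence sentences max_tokens (chunk_by_sentence sentences max_tokens)

-- ===== LEMMAS AND PROOFS =====

-- list-level description of B's inner count: how many further sentences are taken
def pvCnt (m : Int) (size : Int) : List (List String) → Nat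
  | [] => 0
  | s :: rs => if size ≠ 0 ∧ size + (s.length : Int) > m then 0 else 1 + pvCnt m (size + (s.length : Int)) rs

theorem pvCnt_le (m : Int) : ∀ (l : List (List String)) (size : Int), pvCnt m size l ≤ l.length := by
  intro l
  induction l with
  | nil => intro size; simp [pvCnt]
  | cons s rs ih =>
    intro size
    simp only [pvCnt, List.length_cons]
    split
    · omega
    · have := ih (size + (s.length : Int)); omega

-- list-level description of B's outer loop without the accumulator
def pvCont2 (m : Int) : List (List String) → List (List String)
  | [] => []
  | r0 :: rs =>
    let k := pvCnt m (r0.length : Int) rs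
    let head := (r0 :: rs.take k).flatten
    let tail := pvCont2 m (rs.drop k)
    if head ≠ [] then head :: tail else tail
  termination_by l => l.length
  decreasing_by
    have := pvCnt_le m rs (r0.length : Int)
    simp only [List.length_drop, List.length_cons]
    omega

-- A's continuation from state (cur, rest), phrased through B's cut count
def pvStep (m : Int) (cur : List String) (rest : List (List String)) : List (List String) :=
  let k := pvCnt m (cur.length : Int) rest
  let head := cur ++ (rest.take k).flatten
  let tail := pvCont2 m (rest.drop k)
  if head ≠ [] then head :: tail else tail

theorem pv_len_ne (cur : List String) : cur ≠ [] ↔ ((cur.length : Int) ≠ 0) := by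
  simp [List.length_eq_zero_iff]

theorem pvStep_nil (m : Int) (rest : List (List String)) : pvStep m [] rest = pvCont2 m rest := by
  cases rest with
  | nil => simp [pvStep, pvCnt, pvCont2]
  | cons s rs =>
    have hk : pvCnt m 0 (s :: rs) = pvCnt m ((s.length : Int)) rs + 1 := by
      simp [pvCnt, Nat.add_comm]
    simp only [pvStep, List.length_nil, Nat.cast_zero, List.nil_append, hk,
      List.take_succ_cons, List.drop_succ_cons, pvCont2]

theorem pvStep_cons_self (m : Int) (s : List String) (rs : List (List String)) :
    pvStep m s rs = pvCont2 m (s :: rs) := by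
  simp only [pvStep, pvCont2, List.flatten_cons]

-- loop invariant: A's loop from state (chunks, cur, |cur|) computes chunks ++ pvStep m cur rest
theorem pvA_main (m : Int) : ∀ (rest : List (List String)) (cur : List String) (chunks : List (List String)),
    pvA_loop m rest chunks cur (cur.length : Int) = chunks ++ pvStep m cur rest := by
  intro rest
  induction rest with
  | nil =>
    intro cur chunks
    simp only [pvA_loop, pvStep, pvCnt, List.take_nil, List.flatten_nil, List.append_nil,
      List.drop_nil, pvCont2]
    split <;> simp
  | cons s rs ih =>
    intro cur chunks
    simp only [pvA_loop]
    by_cases hc : (cur.length : Int) + (s.length : Int) > m ∧ cur ≠ []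
    · rw [if_pos hc]
      have h1 : pvA_loop m rs (chunks ++ [cur]) ([] ++ s) (0 + (s.length : Int))
          = pvA_loop m rs (chunks ++ [cur]) s ((s.length : Int)) := by
        norm_num
      have hk : pvCnt m (cur.length : Int) (s :: rs) = 0 := by
        simp only [pvCnt]
        rw [if_pos ⟨(pv_len_ne cur).mp hc.2, hc.1⟩]
      have hstep : pvStep m cur (s :: rs) = cur :: pvCont2 m (s :: rs) := by
        simp only [pvStep, hk, List.take_zero, List.flatten_nil, List.append_nil, List.drop_zero]
        rw [if_pos hc.2]
      rw [h1, ih s (chunks ++ [cur]), pvStep_cons_self, hstep]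
      simp
    · rw [if_neg hc]
      have h1 : pvA_loop m rs chunks (cur ++ s) ((cur.length : Int) + (s.length : Int))
          = pvA_loop m rs chunks (cur ++ s) (((cur ++ s).length : Int)) := by
        simp
      rw [h1, ih (cur ++ s) chunks]
      have hk : pvCnt m (cur.length : Int) (s :: rs)
          = 1 + pvCnt m ((cur.length : Int) + (s.length : Int)) rs := by
        simp only [pvCnt]
        rw [if_neg]
        intro ⟨hne, hgt⟩
        exact hc ⟨hgt, (pv_len_ne cur).mpr hne⟩
      have hlen : ((cur ++ s).length : Int) = (cur.length : Int) + (s.length : Int) := by simp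
      simp only [pvStep, hk, hlen]
      have ht : (s :: rs).take (1 + pvCnt m ((cur.length : Int) + (s.length : Int)) rs)
          = s :: rs.take (pvCnt m ((cur.length : Int) + (s.length : Int)) rs) := by
        rw [Nat.add_comm, List.take_succ_cons]
      have hd : (s :: rs).drop (1 + pvCnt m ((cur.length : Int) + (s.length : Int)) rs)
          = rs.drop (pvCnt m ((cur.length : Int) + (s.length : Int)) rs) := by
        rw [Nat.add_comm, List.drop_succ_cons]
      rw [ht, hd]
      simp

-- B's inner loop counts exactly pvCnt over the remaining suffix
theorem pvB_inner_eq (m : Int) (xs : List (List String)) :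
    ∀ j size, pvB_inner m xs xs.length j size = j + pvCnt m size (xs.drop j) := by
  intro j size
  induction j, size using pvB_inner.induct m xs xs.length with
  | case1 j size h ih =>
    rw [pvB_inner, dif_pos h]
    obtain ⟨hj, hstop⟩ := h
    have hget : xs.getD j [] = xs[j] := List.getD_eq_getElem xs [] hj
    have hdrop : xs.drop j = xs[j] :: xs.drop (j + 1) := List.drop_eq_getElem_cons hj
    rw [ih, hdrop]
    simp only [pvCnt, hget]
    rw [if_neg (by rw [← hget]; exact hstop)]
    omega
  | case2 j size h =>
    rw [pvB_inner, dif_neg h]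
    rcases Nat.lt_or_ge j xs.length with hj | hj
    · have hget : xs.getD j [] = xs[j] := List.getD_eq_getElem xs [] hj
      have hdrop : xs.drop j = xs[j] :: xs.drop (j + 1) := List.drop_eq_getElem_cons hj
      have hstop : size ≠ 0 ∧ size + ((xs.getD j []).length : Int) > m := by
        by_contra hs; exact h ⟨hj, hs⟩
      rw [hdrop]
      simp only [pvCnt]
      rw [if_pos (by rw [← hget]; exact hstop)]
      omega
    · rw [List.drop_eq_nil_of_le hj]
      simp [pvCnt]

-- B's outer loop computes chunks ++ pvCont2 on the remaining suffix (fuel d bounds n - i)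
theorem pvB_outer_eq_aux (m : Int) (xs : List (List String)) :
    ∀ (d i : Nat) (chunks : List (List String)), xs.length - i ≤ d →
      pvB_outer m xs xs.length i chunks = chunks ++ pvCont2 m (xs.drop i) := by
  intro d
  induction d with
  | zero =>
    intro i chunks hd
    rw [pvB_outer, dif_neg (by omega), List.drop_eq_nil_of_le (by omega)]
    simp [pvCont2]
  | succ d ihd =>
    intro i chunks hd
    by_cases hlt : i < xs.length
    · have hget : xs.getD i [] = xs[i] := List.getD_eq_getElem xs [] hlt
      have hdropi : xs.drop i = xs[i] :: xs.drop (i + 1) := List.drop_eq_getElem_cons hlt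
      have hkle : pvCnt m ((xs[i].length : Int)) (xs.drop (i + 1)) ≤ xs.length - (i + 1) := by
        have := pvCnt_le m (xs.drop (i + 1)) ((xs[i].length : Int))
        simpa using this
      set k := pvCnt m ((xs[i].length : Int)) (xs.drop (i + 1)) with hkdef
      have hj : pvB_inner m xs xs.length (i + 1) ((xs.getD i []).length : Int) = i + 1 + k := by
        rw [pvB_inner_eq, hget, ← hkdef]
      rw [pvB_outer, dif_pos hlt]
      simp only [hj]
      have hslice : (xs.take (i + 1 + k)).drop i = xs[i] :: (xs.drop (i + 1)).take k := by
        rw [List.drop_take, hdropi]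
        have : i + 1 + k - i = k + 1 := by omega
        rw [this, List.take_succ_cons]
      have hdropj : xs.drop (i + 1 + k) = (xs.drop (i + 1)).drop k := by
        rw [List.drop_drop]
      rw [ihd (i + 1 + k) _ (by omega), hslice, hdropj]
      conv_rhs => rw [hdropi, pvCont2]
      simp only [← hkdef]
      split <;> simp
    · rw [pvB_outer, dif_neg hlt, List.drop_eq_nil_of_le (by omega)]
      simp [pvCont2]

-- ===== VERDICT (by name: the statement is the Claim_ definition above) =====
theorem chunk_by_sentence_spec : Claim_equal_chunk_by_sentence := by
  intro sentences max_tokens _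
  unfold Spec_chunk_by_sentence chunk_by_sentence chunk_by_sentence_alt
  have hA : pvA_loop max_tokens sentences [] [] 0 = [] ++ pvStep max_tokens [] sentences := by
    have := pvA_main max_tokens sentences [] []
    simpa using this
  have hB := pvB_outer_eq_aux max_tokens sentences sentences.length 0 [] (by omega)
  rw [hA, hB]
  simp [pvStep_nil]
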